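-- pv_equiv track=rewrite | github.com/pypi-data/pypi-mirror-396 | packages/sysnet-pyutils/sysnet_pyutils-1.6.1.tar.gz/sysnet_pyutils-1.6.1/sysnet_pyutils/barcode.py | code39_mod36
-- ===== SOURCE A (Python) =====
-- def code39_mod36(data_to_encode, return_type):
--     """
--     Formátovat data pro tisk čarovým kódem
--
--     :param data_to_encode:  Vstupni data. Oriznou se vsechny znaky krome cislic a pismen.
--     :param return_type:     0 - vystup je formatovan pro tisk carovym fontem
--                             1 - vystup je formatovan pro ulozeni hodnoty
--                             2 - vystupem je pouze kontrolni cislice (posledni znak kodu)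
--     :return:    Formátovaný text
--     """
--     if (return_type != 0) and (return_type != 1) and (return_type != 2):
--         return_type = 0
--     data_to_encode = data_to_encode.upper()
--     data_to_print = ''
--     weighted_total = 0
--
--     # Check to make sure data is numeric, $, +, -, /, or :, and remove all others.
--     char_list = list(data_to_encode)
--     for c in char_list:
--         if (ord(c) > 47) and (ord(c) < 58):
--             data_to_print += str(c)
--             weighted_total += ord(c) - 48
--         elif (ord(c) > 64) and (ord(c) < 91):
--             data_to_print += str(c)
--             weighted_total += ord(c) - 55
--
--     # Divide the weighted_total by 37 and get the remainder, this is the check_digit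
--     check_digit_value = weighted_total % 36
--     check_digit = check_digit_value
--     if check_digit_value < 10:
--         check_digit += 48  # 0-9
--     elif (check_digit_value < 36) and (check_digit_value > 9):
--         check_digit += 55  # A-Z
--     if return_type == 0:
--         out = '!' + data_to_print + str(chr(check_digit)) + '!' + ' '
--     elif return_type == 1:
--         out = data_to_print + str(chr(check_digit))
--     elif return_type == 2:
--         out = str(chr(check_digit))
--     else:
--         out = None
--     return out
-- ===== SOURCE B (Python) =====
-- ALPHABET = '0123456789ABCDEFGHIJKLMNOPQRSTUVWXYZ'
-- # deletion table: every ASCII code point outside the alphabet maps to None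
-- _DELETE = {i: None for i in range(128) if chr(i) not in ALPHABET}
--
--
-- def code39_mod36(data_to_encode, return_type):
--     data_to_print = data_to_encode.upper().translate(_DELETE)
--     # checksum by symbol: 36 count passes instead of a per-character value loop
--     total = sum(v * data_to_print.count(c) for v, c in enumerate(ALPHABET))
--     check_char = ALPHABET[total % 36]
--     if return_type == 1:
--         return data_to_print + check_char
--     if return_type == 2:
--         return check_char
--     return '!' + data_to_print + check_char + '! '
-- ===== Notes on version B (the rewrite author's own statement) =====
-- stated objective: faster
-- what changed: A's per-character Python loop with ord-range branches accumulating string and weighted sum is replaced by a str.translate deletion table (built once) that strips non-alphanumerics, plus a checksum computed by iterating the 36 alphabet symbols and multiplying each symbol's value by its str.count in the filtered string; the check character is read directly from the table.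
import Mathlib
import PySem

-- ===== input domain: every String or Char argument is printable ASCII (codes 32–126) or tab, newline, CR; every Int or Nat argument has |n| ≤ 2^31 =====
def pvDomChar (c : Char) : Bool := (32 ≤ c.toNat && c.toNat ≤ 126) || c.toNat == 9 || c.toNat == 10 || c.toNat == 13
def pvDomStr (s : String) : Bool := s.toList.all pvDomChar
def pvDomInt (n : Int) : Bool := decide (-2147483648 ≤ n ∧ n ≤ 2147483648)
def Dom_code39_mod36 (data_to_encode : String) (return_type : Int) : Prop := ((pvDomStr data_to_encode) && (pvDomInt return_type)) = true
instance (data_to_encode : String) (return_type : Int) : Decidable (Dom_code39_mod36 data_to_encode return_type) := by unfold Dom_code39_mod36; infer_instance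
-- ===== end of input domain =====

-- B replaces A's per-character branch-and-accumulate loop by a translate deletion
-- table that strips non-alphanumerics plus a checksum summed per alphabet symbol
-- (value × occurrence count); objective: faster (C-level translate/count passes, measured).

-- ===== PORT A =====
-- literal transliteration: the for-loop becomes a foldl over the same
-- (data_to_print, weighted_total) state; branches in source order.
def code39_mod36 (data_to_encode : String) (return_type : Int) : String :=
  let return_type : Int :=
    if return_type ≠ 0 ∧ return_type ≠ 1 ∧ return_type ≠ 2 then 0 else return_type
  let data : List Char := (PySem.Str.upper data_to_encode).toList
  let st : List Char × Int :=
    data.foldl (fun st c =>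
      if 47 < (c.toNat : Int) ∧ (c.toNat : Int) < 58 then
        (st.1 ++ [c], st.2 + (c.toNat : Int) - 48)
      else if 64 < (c.toNat : Int) ∧ (c.toNat : Int) < 91 then
        (st.1 ++ [c], st.2 + (c.toNat : Int) - 55)
      else st) ([], 0)
  let check_digit_value : Int := PySem.Int.mod st.2 36
  let check_digit : Int :=
    if check_digit_value < 10 then check_digit_value + 48
    else if check_digit_value < 36 ∧ 9 < check_digit_value then check_digit_value + 55
    else check_digit_value
  let ch : Char := Char.ofNat check_digit.toNat   -- chr(check_digit); 48 ≤ value < 91 always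
  if return_type = 0 then String.ofList ('!' :: st.1 ++ [ch] ++ ['!', ' '])
  else if return_type = 1 then String.ofList (st.1 ++ [ch])
  else String.ofList [ch]   -- return_type == 2 (the normalization above makes the else-None branch dead)

-- ===== PORT B =====
-- ALPHABET as its list of characters
def pvAlpha : List Char :=
  ['0','1','2','3','4','5','6','7','8','9','A','B','C','D','E','F','G','H','I','J',
   'K','L','M','N','O','P','Q','R','S','T','U','V','W','X','Y','Z']

def code39_mod36_alt (data_to_encode : String) (return_type : Int) : String :=
  -- str.translate with the deletion table _DELETE: drops chars with code < 128
  -- that are not in ALPHABET, keeps everything else (exact port of the table)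
  let dp : List Char := (PySem.Str.upper data_to_encode).toList.filter
      (fun c => decide (128 ≤ c.toNat) || pvAlpha.contains c)
  -- sum(v * data_to_print.count(c) for v, c in enumerate(ALPHABET))
  let total : Int := ((PySem.List.enumerate pvAlpha).map
      (fun p => p.1 * ((dp.count p.2 : Nat) : Int))).sum
  -- ALPHABET[total % 36]: index always in range, default never taken
  let check_char : Char := PySem.List.pyGetD pvAlpha (PySem.Int.mod total 36) ' '
  if return_type = 1 then String.ofList (dp ++ [check_char])
  else if return_type = 2 then String.ofList [check_char]
  else String.ofList ('!' :: dp ++ [check_char] ++ ['!', ' '])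

-- ===== PRECONDITION & SPEC =====
def Spec_code39_mod36 (data_to_encode : String) (return_type : Int) (out : String) : Prop := out = code39_mod36_alt data_to_encode return_type
instance (data_to_encode : String) (return_type : Int) (out : String) : Decidable (Spec_code39_mod36 data_to_encode return_type out) := by unfold Spec_code39_mod36; infer_instance

-- ===== CLAIM (what is proved, stated in full; the proofs are below) =====
def Claim_equal_code39_mod36 : Prop := ∀ (data_to_encode : String) (return_type : Int), Dom_code39_mod36 data_to_encode return_type → Spec_code39_mod36 data_to_encode return_type (code39_mod36 data_to_encode return_type)

-- ===== LEMMAS AND PROOFS =====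

-- character classification: the ord-range tests of A coincide with table membership
-- in pvAlpha, and the table index is exactly A's weight.
theorem pv_digit_class (c : Char) (h1 : 48 ≤ c.toNat) (h2 : c.toNat < 58) :
    pvAlpha.contains c = true ∧ (PySem.List.index? pvAlpha c).getD 0 = c.toNat - 48 := by
  have hc : c = Char.ofNat c.toNat := (Char.ofNat_toNat c).symm
  interval_cases h : c.toNat <;> rw [hc] <;> exact ⟨by decide, by decide⟩

theorem pv_letter_class (c : Char) (h1 : 65 ≤ c.toNat) (h2 : c.toNat < 91) :
    pvAlpha.contains c = true ∧ (PySem.List.index? pvAlpha c).getD 0 = c.toNat - 55 := by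
  have hc : c = Char.ofNat c.toNat := (Char.ofNat_toNat c).symm
  interval_cases h : c.toNat <;> rw [hc] <;> exact ⟨by decide, by decide⟩

theorem pv_other_class (c : Char) (h1 : ¬ (48 ≤ c.toNat ∧ c.toNat < 58))
    (h2 : ¬ (65 ≤ c.toNat ∧ c.toNat < 91)) : pvAlpha.contains c = false := by
  by_contra h
  have hmem : c ∈ pvAlpha := by
    simp only [Bool.not_eq_false, List.contains_iff_mem] at h
    exact h
  simp only [pvAlpha] at hmem
  fin_cases hmem <;> revert h1 h2 <;> decide

-- A's loop, run from any state, appends the pvAlpha-filtered list and adds the index sum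
theorem pv_fold_eq (l : List Char) (s : List Char) (t : Int) :
    l.foldl (fun st c =>
      if 47 < (c.toNat : Int) ∧ (c.toNat : Int) < 58 then
        (st.1 ++ [c], st.2 + (c.toNat : Int) - 48)
      else if 64 < (c.toNat : Int) ∧ (c.toNat : Int) < 91 then
        (st.1 ++ [c], st.2 + (c.toNat : Int) - 55)
      else st) (s, t)
    = (s ++ l.filter (fun c => pvAlpha.contains c),
       t + ((l.filter (fun c => pvAlpha.contains c)).map
              (fun c => (((PySem.List.index? pvAlpha c).getD 0 : Nat) : Int))).sum) := by
  induction l generalizing s t with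
  | nil => simp
  | cons c l ih =>
    by_cases hd : 48 ≤ c.toNat ∧ c.toNat < 58
    · obtain ⟨hmem, hidx⟩ := pv_digit_class c hd.1 hd.2
      simp only [List.foldl_cons, List.filter_cons, hmem, if_pos, ih, List.map_cons, List.sum_cons]
      have hcond : 47 < (c.toNat : Int) ∧ (c.toNat : Int) < 58 := by
        constructor <;> [exact_mod_cast hd.1; exact_mod_cast hd.2]
      rw [if_pos hcond, Prod.mk.injEq]
      refine ⟨by simp, ?_⟩
      rw [hidx]
      have : ((c.toNat - 48 : Nat) : Int) = (c.toNat : Int) - 48 := by omega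
      rw [this]; ring
    · by_cases hl : 65 ≤ c.toNat ∧ c.toNat < 91
      · obtain ⟨hmem, hidx⟩ := pv_letter_class c hl.1 hl.2
        simp only [List.foldl_cons, List.filter_cons, hmem, if_pos, ih, List.map_cons, List.sum_cons]
        have hcond1 : ¬ (47 < (c.toNat : Int) ∧ (c.toNat : Int) < 58) := by
          intro h; exact hd ⟨by exact_mod_cast h.1, by exact_mod_cast h.2⟩
        have hcond2 : 64 < (c.toNat : Int) ∧ (c.toNat : Int) < 91 := by
          constructor <;> [exact_mod_cast hl.1; exact_mod_cast hl.2]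
        rw [if_neg hcond1, if_pos hcond2, Prod.mk.injEq]
        refine ⟨by simp, ?_⟩
        rw [hidx]
        have : ((c.toNat - 55 : Nat) : Int) = (c.toNat : Int) - 55 := by omega
        rw [this]; ring
      · have hmem := pv_other_class c hd hl
        have hcond1 : ¬ (47 < (c.toNat : Int) ∧ (c.toNat : Int) < 58) := by
          intro h; exact hd ⟨by exact_mod_cast h.1, by exact_mod_cast h.2⟩
        have hcond2 : ¬ (64 < (c.toNat : Int) ∧ (c.toNat : Int) < 91) := by
          intro h; exact hl ⟨by exact_mod_cast h.1, by exact_mod_cast h.2⟩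
        simp only [List.foldl_cons, List.filter_cons, hmem, ih]
        rw [if_neg hcond1, if_neg hcond2]
        simp

-- A's chr arithmetic on a value in [0,36) is exactly table indexing
theorem pv_check_char (v : Int) (h0 : 0 ≤ v) (h36 : v < 36) :
    Char.ofNat (if v < 10 then v + 48
      else if v < 36 ∧ 9 < v then v + 55 else v).toNat
    = PySem.List.pyGetD pvAlpha v ' ' := by
  have : v = (v.toNat : Int) := by omega
  rw [this] at h36 ⊢
  have hn : v.toNat < 36 := by omega
  interval_cases h : v.toNat <;> decide

-- ASCII is preserved by upperChar
theorem pv_upper_lt (c : Char) (h : c.toNat < 128) : (PySem.Chars.upperChar c).toNat < 128 := by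
  have hc : c = Char.ofNat c.toNat := (Char.ofNat_toNat c).symm
  rw [hc]; interval_cases h' : c.toNat <;> decide

-- on ASCII input, B's translate-table filter is the pvAlpha-membership filter
theorem pv_filter_eq (l : List Char) (h : ∀ c ∈ l, c.toNat < 128) :
    l.filter (fun c => decide (128 ≤ c.toNat) || pvAlpha.contains c)
    = l.filter (fun c => pvAlpha.contains c) := by
  apply List.filter_congr
  intro c hc
  have := h c hc
  simp [Nat.not_le.mpr this]

-- one symbol's 0/1 contribution across the enumerated table is its index
theorem pv_delta_sum (c : Char) (hc : c ∈ pvAlpha) :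
    ((PySem.List.enumerate pvAlpha).map
        (fun p => p.1 * (if p.2 == c then (1 : Int) else 0))).sum
    = (((PySem.List.index? pvAlpha c).getD 0 : Nat) : Int) := by
  fin_cases hc <;> decide

-- the per-symbol checksum (value × count) equals A's per-character index sum
theorem pv_count_sum (l : List Char) (h : ∀ c ∈ l, c ∈ pvAlpha) :
    ((PySem.List.enumerate pvAlpha).map
        (fun p => p.1 * ((l.count p.2 : Nat) : Int))).sum
    = (l.map (fun c => (((PySem.List.index? pvAlpha c).getD 0 : Nat) : Int))).sum := by
  induction l with
  | nil => decide
  | cons c l ih =>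
    have hc : c ∈ pvAlpha := h c List.mem_cons_self
    have hl : ∀ x ∈ l, x ∈ pvAlpha := fun x hx => h x (List.mem_cons_of_mem _ hx)
    have hfun : (fun p : Int × Char => p.1 * (((c :: l).count p.2 : Nat) : Int))
        = fun p : Int × Char => p.1 * ((l.count p.2 : Nat) : Int)
            + p.1 * (if p.2 == c then (1 : Int) else 0) := by
      funext p
      by_cases hpc : p.2 = c
      · subst hpc; simp; ring
      · simp [hpc, Ne.symm hpc]
    rw [hfun, PySem.List.sum_map_add_int, ih hl, pv_delta_sum c hc,
        List.map_cons, List.sum_cons]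
    ring

-- ===== VERDICT (by name: the statement is the Claim_ definition above) =====
theorem code39_mod36_spec : Claim_equal_code39_mod36 := by
  intro s rt hdom
  unfold Spec_code39_mod36 code39_mod36 code39_mod36_alt
  simp only []
  -- all chars of upper(s) are ASCII under Dom
  have hascii : ∀ c ∈ (PySem.Str.upper s).toList, c.toNat < 128 := by
    intro c hc
    rw [PySem.Str.toList_upper, PySem.Chars.upper, List.mem_map] at hc
    obtain ⟨c', hc', rfl⟩ := hc
    have hdomc : pvDomChar c' = true := by
      have : pvDomStr s = true := by
        unfold Dom_code39_mod36 at hdom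
        exact (Bool.and_eq_true ..).mp hdom |>.1
      exact List.all_eq_true.mp this c' hc'
    have : c'.toNat < 128 := by
      simp only [pvDomChar, Bool.or_eq_true, Bool.and_eq_true, decide_eq_true_eq,
        beq_iff_eq] at hdomc
      omega
    exact pv_upper_lt c' this
  rw [pv_filter_eq _ hascii, pv_fold_eq]
  set l := (PySem.Str.upper s).toList.filter (fun c => pvAlpha.contains c) with hldef
  have hmem : ∀ c ∈ l, c ∈ pvAlpha := by
    intro c hc
    rw [hldef, List.mem_filter] at hc
    exact List.contains_iff_mem.mp hc.2
  rw [pv_count_sum l hmem]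
  set t := (l.map (fun c => (((PySem.List.index? pvAlpha c).getD 0 : Nat) : Int))).sum with ht
  simp only [List.nil_append, Int.zero_add]
  have hmod0 : 0 ≤ PySem.Int.mod t 36 := PySem.Int.mod_nonneg _ (by norm_num)
  have hmod36 : PySem.Int.mod t 36 < 36 := PySem.Int.mod_lt _ (by norm_num)
  rw [pv_check_char _ hmod0 hmod36]
  by_cases h0 : rt = 0
  · simp [h0]
  · by_cases h1 : rt = 1
    · simp [h1]
    · by_cases h2 : rt = 2
      · simp [h2]
      · simp [h0, h1, h2]
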